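-- pv_equiv track=rewrite | github.com/sockduct/Weekly | codewars-wk6-2.py | game3
-- ===== SOURCE A (Python) =====
-- from functools import reduce
-- from itertools import repeat
-- from math import gcd
--
-- def game3(n):
--     numerator = 0
--     denominator = 1
--
--     rowres = []
--     for row_denom in range(1, n + 1):
--         # row = [Fraction(col_num, row_denom + col_num) for col_num in range(1, n + 1)]
--         cur_row_nums = [col_num for col_num in range(1, n + 1)]
--         cur_row_denoms = [row_denom + col_num for col_num in range(1, n + 1)]
--         lmult = reduce(lcm, cur_row_denoms)
--         cur_row_lcm = repeat(lmult, n)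
--         cur_row_pairs = map(lambda ndl: (ndl[0] * (ndl[2]//ndl[1]), ndl[2]), zip(cur_row_nums, cur_row_denoms, cur_row_lcm))
--         # cur_row_pair = reduce(lambda f1, f2: (f1[0] + f2[0], f1[1]), cur_row_pairs)
--         # numerator, denominator = add_fractions(numerator, denominator, cur_row_pair[0], cur_row_pair[1])
--         rowres.append(reduce(lambda f1, f2: (f1[0] + f2[0], f1[1]), cur_row_pairs))
--
--     lmult = reduce(lcm, [d for n, d in rowres])
--     rowres_lcm = repeat(lmult, n)
--     rowres_pairs = map(lambda ndl: (ndl[0][0] * (ndl[1]//ndl[0][1]), ndl[1]), zip(rowres, rowres_lcm))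
--     numerator, denominator = reduce(lambda f1, f2: (f1[0] + f2[0], f1[1]), rowres_pairs)
--
--     divisor = gcd(numerator, denominator)
--     if divisor > 1:
--         numerator //= divisor
--         denominator //= divisor
--
--     if numerator == 0 or denominator == 1:
--         return [numerator]
--     else:
--         return [numerator, denominator]
--
-- def lcm(a, b):
--     return (a * b)//gcd(a, b)
-- ===== SOURCE B (Python) =====
-- def game3(n):
--     # sum_{r,c=1..n} c/(r+c) = n^2/2 by symmetry; return it as a reduced fraction
--     m = n * n
--     if m % 2 == 0:
--         return [m // 2]
--     else:
--         return [m, 2]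
-- ===== Notes on version B (the rewrite author's own statement) =====
-- stated objective: faster
-- what changed: Replaced the O(n^2) row-by-row lcm/fraction summation by the closed form sum_{r,c} c/(r+c) = n^2/2, returned directly as a reduced fraction.
import Mathlib
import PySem

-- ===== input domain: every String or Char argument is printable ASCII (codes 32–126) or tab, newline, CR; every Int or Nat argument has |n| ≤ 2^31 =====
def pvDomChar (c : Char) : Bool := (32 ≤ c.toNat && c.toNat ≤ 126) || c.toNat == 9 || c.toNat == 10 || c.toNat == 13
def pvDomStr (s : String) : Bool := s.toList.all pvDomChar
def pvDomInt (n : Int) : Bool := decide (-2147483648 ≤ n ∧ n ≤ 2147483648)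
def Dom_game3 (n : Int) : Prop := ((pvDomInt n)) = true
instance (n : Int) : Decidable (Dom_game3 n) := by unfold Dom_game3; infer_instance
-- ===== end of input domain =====

-- B replaces A's O(n^2) lcm/fraction summation by the closed form n^2/2 (faster, asymptotic).

-- ===== PORT A =====
-- math.lcm-style helper of the module: lcm(a,b) = (a*b)//gcd(a,b)
def pyLcm (a b : Int) : Int := PySem.Int.floordiv (a * b) (Int.gcd a b : Int)

-- functools.reduce(f, l): none on [] (Python raises TypeError there; Pre_ excludes it)
def pyReduce {α : Type} (f : α → α → α) : List α → Option α
  | [] => none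
  | x :: xs => some (xs.foldl f x)

def game3 (n : Int) : List Int :=
  let rowres : List (Int × Int) :=
    (PySem.List.pyRange 1 (n + 1) 1).foldl (fun acc row_denom =>
      let cur_row_nums := PySem.List.pyRange 1 (n + 1) 1
      let cur_row_denoms := cur_row_nums.map (fun col_num => row_denom + col_num)
      let lmult := (pyReduce pyLcm cur_row_denoms).getD 0
      let cur_row_pairs := (cur_row_nums.zip cur_row_denoms).map
        (fun nd => (nd.1 * PySem.Int.floordiv lmult nd.2, lmult))
      acc ++ [(pyReduce (fun f1 f2 => (f1.1 + f2.1, f1.2)) cur_row_pairs).getD (0, 0)]) []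
  let lmult := (pyReduce pyLcm (rowres.map (fun p => p.2))).getD 0
  let rowres_pairs := rowres.map (fun p => (p.1 * PySem.Int.floordiv lmult p.2, lmult))
  let nd := (pyReduce (fun f1 f2 => (f1.1 + f2.1, f1.2)) rowres_pairs).getD (0, 0)
  let numerator := nd.1
  let denominator := nd.2
  let divisor : Int := (Int.gcd numerator denominator : Int)
  let numerator := if divisor > 1 then PySem.Int.floordiv numerator divisor else numerator
  let denominator := if divisor > 1 then PySem.Int.floordiv denominator divisor else denominator
  if numerator = 0 ∨ denominator = 1 then [numerator] else [numerator, denominator]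

-- ===== PORT B =====
def game3_alt (n : Int) : List Int :=
  let m := n * n
  if PySem.Int.mod m 2 = 0 then [PySem.Int.floordiv m 2] else [m, 2]

-- ===== PRECONDITION & SPEC =====
-- Pre_ excludes n ≤ 0, where A's reduce() over an empty row list raises TypeError.
def Pre_game3 (n : Int) : Prop := 1 ≤ n
instance (n : Int) : Decidable (Pre_game3 n) := by unfold Pre_game3; infer_instance
def pvWitness_game3 : Int := (3)

def Spec_game3 (n : Int) (out : List Int) : Prop := out = game3_alt n
instance (n : Int) (out : List Int) : Decidable (Spec_game3 n out) := by unfold Spec_game3; infer_instance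

-- ===== CLAIM (what is proved, stated in full; the proofs are below) =====
def Claim_equal_game3 : Prop := ∀ (n : Int), Dom_game3 n → Pre_game3 n → Spec_game3 n (game3 n)

-- ===== LEMMAS AND PROOFS =====

-- abbreviations for A's intermediate quantities
def rowM (n r : Int) : Int :=
  (pyReduce pyLcm ((PySem.List.pyRange 1 (n + 1) 1).map (fun c => r + c))).getD 0
def rowS (n r : Int) : Int :=
  (((PySem.List.pyRange 1 (n + 1) 1).map
    (fun c => c * PySem.Int.floordiv (rowM n r) (r + c)))).sum
def totL (n : Int) : Int :=
  (pyReduce pyLcm ((PySem.List.pyRange 1 (n + 1) 1).map (fun r => rowM n r))).getD 0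
def totN (n : Int) : Int :=
  (((PySem.List.pyRange 1 (n + 1) 1).map
    (fun r => rowS n r * PySem.Int.floordiv (totL n) (rowM n r)))).sum

-- A's tail after the double summation
def finishA (N L : Int) : List Int :=
  let g : Int := (Int.gcd N L : Int)
  let N' := if g > 1 then PySem.Int.floordiv N g else N
  let L' := if g > 1 then PySem.Int.floordiv L g else L
  if N' = 0 ∨ L' = 1 then [N'] else [N', L']

lemma foldl_append_map {α β : Type} (g : α → β) :
    ∀ (l : List α) (init : List β),
      l.foldl (fun acc x => acc ++ [g x]) init = init ++ l.map g := by
  intro l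
  induction l with
  | nil => simp
  | cons x xs ih => intro init; simp [List.foldl_cons, ih]

lemma reduce_add (p : Int × Int) (ps : List (Int × Int)) :
    pyReduce (fun f1 f2 => (f1.1 + f2.1, f1.2)) (p :: ps) =
      some ((((p :: ps).map Prod.fst).sum), p.2) := by
  simp only [pyReduce, Option.some.injEq]
  induction ps generalizing p with
  | nil => simp
  | cons q qs ih =>
    simp only [List.foldl_cons]
    have h := ih (p.1 + q.1, p.2)
    simp only [List.map_cons, List.sum_cons] at h ⊢
    rw [h]
    rw [Prod.mk.injEq]
    exact ⟨by ring, rfl⟩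

lemma pyLcm_eq (a b : Int) (ha : 0 < a) (hb : 0 < b) : pyLcm a b = (Int.lcm a b : Int) := by
  have hg : 0 < Int.gcd a b := Int.gcd_pos_of_ne_zero_left b (by omega)
  have hprod : (Int.gcd a b : Int) * (Int.lcm a b : Int) = a * b := by
    have := Int.gcd_mul_lcm a b
    have h1 : ((Int.gcd a b * Int.lcm a b : Nat) : Int) = ((a.natAbs * b.natAbs : Nat) : Int) := by
      exact_mod_cast congrArg (Nat.cast : Nat → Int) this
    push_cast at h1
    rw [abs_of_pos ha, abs_of_pos hb] at h1
    exact h1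
  unfold pyLcm
  rw [PySem.Int.floordiv_eq_ediv_of_pos (by exact_mod_cast hg), ← hprod,
    Int.mul_ediv_cancel_left _ (by exact_mod_cast Nat.pos_iff_ne_zero.mp hg)]

lemma lcm_foldl (l : List Int) (a : Int) (ha : 0 < a) (hl : ∀ x ∈ l, 0 < x) :
    0 < l.foldl pyLcm a ∧ a ∣ l.foldl pyLcm a ∧ ∀ x ∈ l, x ∣ l.foldl pyLcm a := by
  induction l generalizing a with
  | nil => exact ⟨ha, dvd_refl a, by simp⟩
  | cons x xs ih =>
    have hx : 0 < x := hl x (by simp)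
    have hlcm : 0 < pyLcm a x ∧ a ∣ pyLcm a x ∧ x ∣ pyLcm a x := by
      rw [pyLcm_eq a x ha hx]
      refine ⟨?_, Int.dvd_lcm_left a x, Int.dvd_lcm_right a x⟩
      have := Int.lcm_ne_zero (m := a) (n := x) (by omega) (by omega)
      exact_mod_cast Nat.pos_of_ne_zero this
    obtain ⟨h1, h2, h3⟩ := ih (pyLcm a x) hlcm.1 (fun y hy => hl y (by simp [hy]))
    refine ⟨h1, dvd_trans hlcm.2.1 h2, ?_⟩
    intro y hy
    rcases List.mem_cons.mp hy with rfl | hy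
    · exact dvd_trans hlcm.2.2 h2
    · exact h3 y hy

lemma reduce_lcm (l : List Int) (hne : l ≠ []) (hl : ∀ x ∈ l, 0 < x) :
    0 < (pyReduce pyLcm l).getD 0 ∧ ∀ x ∈ l, x ∣ (pyReduce pyLcm l).getD 0 := by
  match l with
  | [] => exact absurd rfl hne
  | x :: xs =>
    simp only [pyReduce, Option.getD_some]
    obtain ⟨h1, h2, h3⟩ := lcm_foldl xs x (hl x (by simp)) (fun y hy => hl y (by simp [hy]))
    refine ⟨h1, ?_⟩
    intro y hy
    rcases List.mem_cons.mp hy with rfl | hy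
    · exact h2
    · exact h3 y hy

lemma sum_map_range (n : Nat) (f : Nat → Int) :
    ((List.range n).map f).sum = ∑ i ∈ Finset.range n, f i := by
  induction n with
  | zero => simp
  | succ m ih => simp [List.range_succ, Finset.sum_range_succ, ih]

lemma sum_map_pyRange (a b : Int) (f : Int → Int) :
    ((PySem.List.pyRange a b 1).map f).sum
      = ∑ k ∈ Finset.range (b - a).toNat, f (a + k) := by
  rw [PySem.List.pyRange_one, List.map_map, sum_map_range]
  rfl

lemma ediv_pos_of_dvd {d L : Int} (hd : 0 < d) (hdvd : d ∣ L) (hL : 0 < L) : 0 < L / d := by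
  obtain ⟨q, rfl⟩ := hdvd
  rw [Int.mul_ediv_cancel_left _ (by omega)]
  nlinarith

lemma ediv_mul_ediv {d m L : Int} (hd : 0 < d) (hdm : d ∣ m) (hm : 0 < m) (hmL : m ∣ L) :
    (m / d) * (L / m) = L / d := by
  obtain ⟨k, rfl⟩ := hdm
  obtain ⟨j, rfl⟩ := hmL
  rw [Int.mul_ediv_cancel_left _ (by omega), Int.mul_ediv_cancel_left _ (by omega),
    mul_assoc, Int.mul_ediv_cancel_left _ (by omega)]

lemma zip_self_map {α β : Type} (l : List α) (f : α → β) :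
    l.zip (l.map f) = l.map (fun x => (x, f x)) := by
  induction l with
  | nil => rfl
  | cons x xs ih => simp [ih]

lemma reduce_add_map (R : List Int) (hR : R ≠ []) (F : Int → Int) (L : Int) :
    (pyReduce (fun f1 f2 => (f1.1 + f2.1, f1.2)) (R.map (fun x => (F x, L)))).getD (0, 0)
      = ((R.map F).sum, L) := by
  match R with
  | [] => exact absurd rfl hR
  | x :: xs =>
    rw [List.map_cons, reduce_add]
    simp [List.map_map, Function.comp_def]

lemma pyRange_ne_nil (n : Int) (h : 1 ≤ n) : PySem.List.pyRange 1 (n + 1) 1 ≠ [] := by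
  rw [PySem.List.pyRange_one_cons (by omega)]
  simp

lemma game3_eq_finishA (n : Int) (h : 1 ≤ n) : game3 n = finishA (totN n) (totL n) := by
  have hne := pyRange_ne_nil n h
  have hrow : ∀ r : Int,
      (pyReduce (fun f1 f2 => (f1.1 + f2.1, f1.2))
        (((PySem.List.pyRange 1 (n + 1) 1).zip
            ((PySem.List.pyRange 1 (n + 1) 1).map (fun col_num => r + col_num))).map
          (fun nd => (nd.1 * PySem.Int.floordiv (rowM n r) nd.2, rowM n r)))).getD (0, 0)
        = (rowS n r, rowM n r) := by
    intro r
    rw [zip_self_map, List.map_map]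
    have hc : ((fun nd : Int × Int => (nd.1 * PySem.Int.floordiv (rowM n r) nd.2, rowM n r)) ∘
        fun x => (x, r + x)) = fun x => ((fun c => c * PySem.Int.floordiv (rowM n r) (r + c)) x, rowM n r) := by
      funext x; rfl
    rw [hc, reduce_add_map _ hne]
    rfl
  simp only [game3]
  rw [foldl_append_map, List.nil_append]
  have hM : ∀ r : Int,
      (pyReduce pyLcm ((PySem.List.pyRange 1 (n + 1) 1).map (fun c => r + c))).getD 0 = rowM n r :=
    fun _ => rfl
  simp only [hM, hrow, List.map_map, Function.comp_def]
  have hL : (pyReduce pyLcm ((PySem.List.pyRange 1 (n + 1) 1).map (fun r => rowM n r))).getD 0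
      = totL n := rfl
  rw [hL, reduce_add_map _ hne]
  rfl

lemma rowM_facts (n r : Int) (h : 1 ≤ n) (hr : 1 ≤ r) :
    0 < rowM n r ∧ ∀ c, 1 ≤ c → c ≤ n → (r + c) ∣ rowM n r := by
  have hne := pyRange_ne_nil n h
  have hmem : ∀ x ∈ (PySem.List.pyRange 1 (n + 1) 1).map (fun c => r + c), 0 < x := by
    intro x hx
    obtain ⟨c, hc, rfl⟩ := List.mem_map.mp hx
    rw [PySem.List.mem_pyRange_one] at hc
    omega
  obtain ⟨h1, h2⟩ := reduce_lcm _ (by simpa using hne) hmem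
  refine ⟨h1, fun c hc1 hc2 => h2 _ ?_⟩
  exact List.mem_map.mpr ⟨c, PySem.List.mem_pyRange_one.mpr ⟨hc1, by omega⟩, rfl⟩

lemma totL_facts (n : Int) (h : 1 ≤ n) :
    0 < totL n ∧ ∀ r, 1 ≤ r → r ≤ n → rowM n r ∣ totL n := by
  have hne := pyRange_ne_nil n h
  have hmem : ∀ x ∈ (PySem.List.pyRange 1 (n + 1) 1).map (fun r => rowM n r), 0 < x := by
    intro x hx
    obtain ⟨r, hrm, rfl⟩ := List.mem_map.mp hx
    rw [PySem.List.mem_pyRange_one] at hrm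
    exact (rowM_facts n r h hrm.1).1
  obtain ⟨h1, h2⟩ := reduce_lcm _ (by simpa using hne) hmem
  refine ⟨h1, fun r hr1 hr2 => h2 _ ?_⟩
  exact List.mem_map.mpr ⟨r, PySem.List.mem_pyRange_one.mpr ⟨hr1, by omega⟩, rfl⟩

lemma main_identity (n : Int) (h : 1 ≤ n) :
    2 * totN n = n * n * totL n ∧ 0 < totN n := by
  have hn' : ((n.toNat : Int)) = n := Int.toNat_of_nonneg (by omega)
  have hL := totL_facts n h
  have hb : (n + 1 - 1).toNat = n.toNat := by norm_num
  have hdvd : ∀ k < n.toNat, ∀ j < n.toNat,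
      (0 : Int) < 1 + (k : Int) + (1 + (j : Int)) ∧
        (1 + (k : Int) + (1 + (j : Int))) ∣ totL n := by
    intro k hk j hj
    have hkn : (k : Int) < n := by omega
    have hjn : (j : Int) < n := by omega
    refine ⟨by omega, dvd_trans ?_ (hL.2 (1 + (k : Int)) (by omega) (by omega))⟩
    exact (rowM_facts n (1 + (k : Int)) h (by omega)).2 (1 + (j : Int)) (by omega) (by omega)
  have hN : totN n = ∑ k ∈ Finset.range n.toNat, ∑ j ∈ Finset.range n.toNat,
      (1 + (j : Int)) * (totL n / (1 + (k : Int) + (1 + (j : Int)))) := by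
    unfold totN
    rw [sum_map_pyRange, hb]
    apply Finset.sum_congr rfl
    intro k hk
    have hkn : (k : Int) < n := by
      have := Finset.mem_range.mp hk; omega
    obtain ⟨hm, hmd⟩ := rowM_facts n (1 + (k : Int)) h (by omega)
    have hmL : rowM n (1 + (k : Int)) ∣ totL n := hL.2 _ (by omega) (by omega)
    unfold rowS
    rw [sum_map_pyRange, hb, Finset.sum_mul]
    apply Finset.sum_congr rfl
    intro j hj
    have hjn : (j : Int) < n := by
      have := Finset.mem_range.mp hj; omega
    have hd : (0 : Int) < 1 + (k : Int) + (1 + (j : Int)) := by omega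
    have hdm : (1 + (k : Int) + (1 + (j : Int))) ∣ rowM n (1 + (k : Int)) :=
      hmd (1 + (j : Int)) (by omega) (by omega)
    rw [PySem.Int.floordiv_eq_ediv_of_pos hm, PySem.Int.floordiv_eq_ediv_of_pos hd, mul_assoc,
      ediv_mul_ediv hd hdm hm hmL]
  constructor
  · have hswap : (∑ k ∈ Finset.range n.toNat, ∑ j ∈ Finset.range n.toNat,
        (1 + (j : Int)) * (totL n / (1 + (k : Int) + (1 + (j : Int)))))
        = ∑ k ∈ Finset.range n.toNat, ∑ j ∈ Finset.range n.toNat,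
        (1 + (k : Int)) * (totL n / (1 + (k : Int) + (1 + (j : Int)))) := by
      conv_lhs => rw [Finset.sum_comm]
      apply Finset.sum_congr rfl
      intro a _
      apply Finset.sum_congr rfl
      intro b _
      rw [show (1 : Int) + (b : Int) + (1 + (a : Int)) = 1 + (a : Int) + (1 + (b : Int)) by ring]
    rw [hN, two_mul]
    nth_rewrite 2 [hswap]
    rw [← Finset.sum_add_distrib]
    have hconst : ∀ k ∈ Finset.range n.toNat,
        ((∑ j ∈ Finset.range n.toNat,
            (1 + (j : Int)) * (totL n / (1 + (k : Int) + (1 + (j : Int)))))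
          + ∑ j ∈ Finset.range n.toNat,
            (1 + (k : Int)) * (totL n / (1 + (k : Int) + (1 + (j : Int)))))
          = (n.toNat : Int) * totL n := by
      intro k hk
      rw [← Finset.sum_add_distrib]
      have hterm : ∀ j ∈ Finset.range n.toNat,
          ((1 + (j : Int)) * (totL n / (1 + (k : Int) + (1 + (j : Int))))
            + (1 + (k : Int)) * (totL n / (1 + (k : Int) + (1 + (j : Int)))))
            = totL n := by
        intro j hj
        have hk' := Finset.mem_range.mp hk
        have hj' := Finset.mem_range.mp hj
        obtain ⟨hpos, hdv⟩ := hdvd k hk' j hj'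
        rw [← add_mul, show (1 : Int) + (j : Int) + (1 + (k : Int))
          = 1 + (k : Int) + (1 + (j : Int)) by ring]
        exact Int.mul_ediv_cancel' hdv
      rw [Finset.sum_congr rfl hterm, Finset.sum_const, Finset.card_range, nsmul_eq_mul]
    rw [Finset.sum_congr rfl hconst, Finset.sum_const, Finset.card_range, nsmul_eq_mul, hn']
    ring
  · rw [hN]
    have hnonempty : (Finset.range n.toNat).Nonempty :=
      ⟨0, Finset.mem_range.mpr (by omega)⟩
    apply Finset.sum_pos _ hnonempty
    intro k hk
    apply Finset.sum_pos _ hnonempty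
    intro j hj
    have hk' := Finset.mem_range.mp hk
    have hj' := Finset.mem_range.mp hj
    obtain ⟨hpos, hdv⟩ := hdvd k hk' j hj'
    exact mul_pos (by positivity) (ediv_pos_of_dvd hpos hdv hL.1)

lemma finishA_eq_alt (n N L : Int) (hN : 0 < N) (hL : 0 < L)
    (hid : 2 * N = n * n * L) : finishA N L = game3_alt n := by
  simp only [finishA, game3_alt]
  have hgpos : (0 : Int) < (Int.gcd N L : Int) := by
    exact_mod_cast Int.gcd_pos_of_ne_zero_left L (by omega)
  have hNdvd : (Int.gcd N L : Int) ∣ N := Int.gcd_dvd_left N L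
  have hLdvd : (Int.gcd N L : Int) ∣ L := Int.gcd_dvd_right N L
  have hifN : (if (Int.gcd N L : Int) > 1 then PySem.Int.floordiv N (Int.gcd N L : Int) else N)
      = N / (Int.gcd N L : Int) := by
    by_cases h1 : (Int.gcd N L : Int) > 1
    · simp [h1, PySem.Int.floordiv_eq_ediv_of_pos hgpos]
    · have hg1 : (Int.gcd N L : Int) = 1 := by omega
      simp [h1, hg1]
  have hifL : (if (Int.gcd N L : Int) > 1 then PySem.Int.floordiv L (Int.gcd N L : Int) else L)
      = L / (Int.gcd N L : Int) := by
    by_cases h1 : (Int.gcd N L : Int) > 1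
    · simp [h1, PySem.Int.floordiv_eq_ediv_of_pos hgpos]
    · have hg1 : (Int.gcd N L : Int) = 1 := by omega
      simp [h1, hg1]
  rw [hifN, hifL]
  set N' := N / (Int.gcd N L : Int) with hN'def
  set L' := L / (Int.gcd N L : Int) with hL'def
  have hcop : Int.gcd N' L' = 1 := Int.gcd_div_gcd_div_gcd (by exact_mod_cast hgpos)
  have hNfac : N = (Int.gcd N L : Int) * N' := (Int.mul_ediv_cancel' hNdvd).symm
  have hLfac : L = (Int.gcd N L : Int) * L' := (Int.mul_ediv_cancel' hLdvd).symm
  have hN'pos : 0 < N' := ediv_pos_of_dvd hgpos hNdvd hN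
  have hL'pos : 0 < L' := ediv_pos_of_dvd hgpos hLdvd hL
  have hid2 : 2 * ((Int.gcd N L : Int) * N') = n * n * ((Int.gcd N L : Int) * L') := by
    rw [← hNfac, ← hLfac]; exact hid
  have hid' : 2 * N' = n * n * L' := by
    apply mul_left_cancel₀ (show (Int.gcd N L : Int) ≠ 0 by omega)
    linear_combination hid2
  have hL'2 : L' ∣ 2 := by
    have h2 : L' ∣ N' * 2 := ⟨n * n, by linarith [hid']⟩
    exact Int.dvd_of_dvd_mul_right_of_gcd_one h2 (by rwa [Int.gcd_comm] at hcop)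
  have hcase : L' = 1 ∨ L' = 2 := by
    have := Int.le_of_dvd (by omega) hL'2
    omega
  rcases hcase with h1 | h2
  · have hnn : n * n = 2 * N' := by rw [hid', h1]; ring
    have hmod : PySem.Int.mod (n * n) 2 = 0 := by
      rw [hnn, PySem.Int.mod_eq_emod_of_pos (by omega)]
      exact Int.mul_emod_right 2 N'
    have hdiv : PySem.Int.floordiv (n * n) 2 = N' := by
      rw [hnn, PySem.Int.floordiv_eq_ediv_of_pos (by omega)]
      exact Int.mul_ediv_cancel_left N' (by omega)
    rw [if_pos (Or.inr h1), if_pos hmod, hdiv]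
  · have hnn : N' = n * n := by
      rw [h2] at hid'
      linarith
    have hmod : ¬ PySem.Int.mod (n * n) 2 = 0 := by
      intro hc
      rw [PySem.Int.mod_eq_emod_of_pos (by omega)] at hc
      have h2N' : (2 : Int) ∣ N' := by
        rw [hnn]
        exact Int.dvd_of_emod_eq_zero hc
      have h2L' : (2 : Int) ∣ L' := by rw [h2]
      have hdd : (2 : Int) ∣ (Int.gcd N' L' : Int) := by
        exact_mod_cast Int.dvd_gcd h2N' h2L'
      rw [hcop] at hdd
      norm_num at hdd
    rw [if_neg hmod]
    have hne1 : ¬ (N' = 0 ∨ L' = 1) := by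
      rintro (hc | hc) <;> omega
    rw [if_neg hne1, hnn, h2]

-- ===== VERDICT (by name: the statement is the Claim_ definition above) =====
theorem game3_spec : Claim_equal_game3 := by
  intro n _ hpre
  unfold Spec_game3
  rw [game3_eq_finishA n hpre]
  obtain ⟨hid, hN⟩ := main_identity n hpre
  exact finishA_eq_alt n _ _ hN (totL_facts n hpre).1 hid
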